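-- pv_equiv track=rewrite | github.com/trekof/cryptohack_write_up_tamledbml4002 | date251008/modulus_inutilis.py | iroot3
-- ===== SOURCE A (Python) =====
-- def iroot3(x):
--     lo, hi = 0, x
--     while lo < hi:
--         mid = (lo + hi) // 2
--         if mid**3 < x:
--             lo = mid + 1
--         else:
--             hi = mid
--     return lo
-- ===== SOURCE B (Python) =====
-- def iroot3(x):
--     # Linear scan for the least nonnegative n with n**3 >= x (0 when x <= 0);
--     # structurally different from A's binary search.
--     if x <= 0:
--         return 0
--     n = 0
--     while n ** 3 < x:
--         n += 1
--     return n
-- ===== Notes on version B (the rewrite author's own statement) =====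
-- stated objective: simpler
-- what changed: Replaces the bisection loop with a direct upward linear scan for the least n with n**3 >= x, after a plain guard returning 0 for x <= 0.
import Mathlib
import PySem

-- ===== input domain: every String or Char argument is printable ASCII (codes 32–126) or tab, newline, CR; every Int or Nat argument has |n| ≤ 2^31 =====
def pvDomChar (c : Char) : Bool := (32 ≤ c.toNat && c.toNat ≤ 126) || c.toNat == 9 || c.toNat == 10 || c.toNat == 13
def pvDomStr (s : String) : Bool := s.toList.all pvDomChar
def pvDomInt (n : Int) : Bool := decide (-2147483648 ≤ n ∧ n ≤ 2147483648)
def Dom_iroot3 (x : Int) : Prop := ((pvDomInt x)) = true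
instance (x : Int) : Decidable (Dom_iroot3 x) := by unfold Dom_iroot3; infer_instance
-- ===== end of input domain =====

-- B replaces A's binary search by a guard for x ≤ 0 plus a direct upward linear
-- scan for the least n with n^3 ≥ x (simpler decomposition, not claimed faster).

-- ===== PORT A =====
-- while lo < hi: mid = (lo+hi)//2; if mid**3 < x: lo = mid+1 else hi = mid
def iroot3Loop (x lo hi : Int) : Int :=
  if h : lo < hi then
    let mid := PySem.Int.floordiv (lo + hi) 2
    if mid ^ 3 < x then iroot3Loop x (mid + 1) hi else iroot3Loop x lo mid
  else lo
termination_by (hi - lo).toNat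
decreasing_by
  · have := PySem.Int.floordiv_two_mid_bounds (lo := lo) (hi := hi) (le_of_lt h)
    omega
  · have := PySem.Int.floordiv_two_mid_bounds (lo := lo) (hi := hi) (le_of_lt h)
    have : lo ≤ PySem.Int.floordiv (lo + hi) 2 := this.1
    -- need mid < hi: from lo < hi, mid = (lo+hi)//2 < hi
    have hlt : PySem.Int.floordiv (lo + hi) 2 < hi := by
      rw [PySem.Int.floordiv_lt_iff_lt_mul (by omega)]
      omega
    omega

def iroot3 (x : Int) : Int := iroot3Loop x 0 x

-- cited by PORT B's decreasing_by and reused below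
theorem le_cube {m : Int} (hm : 0 ≤ m) : m ≤ m ^ 3 := by
  rcases eq_or_lt_of_le hm with h0 | h1
  · simp [← h0]
  · have hmm : (1 : Int) ≤ m * m := by nlinarith
    calc m = m * 1 := (mul_one m).symm
      _ ≤ m * (m * m) := mul_le_mul_of_nonneg_left hmm hm
      _ = m ^ 3 := by ring

-- ===== PORT B =====
-- n starts at 0 and only ever increases; ported with a Nat counter.
def iroot3Scan (x : Int) (n : Nat) : Int :=
  if h : (n : Int) ^ 3 < x then iroot3Scan x (n + 1) else (n : Int)
termination_by (x - n).toNat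
decreasing_by
  have hn : (n : Int) < x := lt_of_le_of_lt (le_cube (Int.natCast_nonneg n)) h
  omega

def iroot3_alt (x : Int) : Int :=
  if x ≤ 0 then 0 else iroot3Scan x 0

-- ===== PRECONDITION & SPEC =====
def Spec_iroot3 (x : Int) (out : Int) : Prop := out = iroot3_alt x
instance (x : Int) (out : Int) : Decidable (Spec_iroot3 x out) := by unfold Spec_iroot3; infer_instance

-- ===== CLAIM (what is proved, stated in full; the proofs are below) =====
def Claim_equal_iroot3 : Prop := ∀ (x : Int), Dom_iroot3 x → Spec_iroot3 x (iroot3 x)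

-- ===== LEMMAS AND PROOFS =====

-- both ports compute the unique least nonnegative r with x ≤ r^3
def IsRoot (x r : Int) : Prop :=
  0 ≤ r ∧ x ≤ r ^ 3 ∧ ∀ m : Int, 0 ≤ m → x ≤ m ^ 3 → r ≤ m

theorem IsRoot_unique {x r s : Int} (hr : IsRoot x r) (hs : IsRoot x s) : r = s :=
  le_antisymm (hr.2.2 s hs.1 hs.2.1) (hs.2.2 r hr.1 hr.2.1)

theorem iroot3Loop_isRoot (x : Int) :
    ∀ lo hi : Int, 0 ≤ lo → lo ≤ hi → x ≤ hi ^ 3 →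
      (∀ m : Int, 0 ≤ m → m < lo → m ^ 3 < x) →
      IsRoot x (iroot3Loop x lo hi) := by
  intro lo hi
  induction lo, hi using iroot3Loop.induct x with
  | case1 lo hi h mid hmid ih =>
    intro hlo hle hhi hbelow
    rw [iroot3Loop, dif_pos h, if_pos hmid]
    have hb := PySem.Int.floordiv_two_mid_bounds (lo := lo) (hi := hi) (le_of_lt h)
    refine ih (by omega) ?_ hhi ?_
    · -- mid + 1 ≤ hi, since mid < hi
      have : PySem.Int.floordiv (lo + hi) 2 < hi := by
        rw [PySem.Int.floordiv_lt_iff_lt_mul (by omega)]; omega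
      omega
    · intro m hm hmlt
      by_cases hcase : m < lo
      · exact hbelow m hm hcase
      · have hmle : m ≤ mid := by omega
        have hcube : m ^ 3 ≤ mid ^ 3 := by gcongr
        omega
  | case2 lo hi h mid hmid ih =>
    intro hlo hle hhi hbelow
    rw [iroot3Loop, dif_pos h, if_neg hmid]
    have hb := PySem.Int.floordiv_two_mid_bounds (lo := lo) (hi := hi) (le_of_lt h)
    exact ih hlo hb.1 (by omega) hbelow
  | case3 lo hi h =>
    intro hlo hle hhi hbelow
    rw [iroot3Loop, dif_neg h]
    have hlohi : lo = hi := le_antisymm hle (not_lt.mp h)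
    refine ⟨hlo, by rw [hlohi]; exact hhi, ?_⟩
    intro m hm hx
    by_contra hc
    have := hbelow m hm (by omega)
    omega

theorem iroot3_isRoot (x : Int) : IsRoot x (iroot3 x) := by
  unfold iroot3
  by_cases hx : x ≤ 0
  · rw [iroot3Loop, dif_neg (by omega)]
    exact ⟨le_refl 0, by simpa using hx, fun m hm _ => hm⟩
  · have h1 : 1 ≤ x := by omega
    refine iroot3Loop_isRoot x 0 x (le_refl 0) (by omega) (le_cube (by omega)) ?_
    intro m hm hmlt; omega

theorem iroot3Scan_isRoot (x : Int) :
    ∀ n : Nat, (∀ m : Int, 0 ≤ m → m < (n : Int) → m ^ 3 < x) →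
      IsRoot x (iroot3Scan x n) := by
  intro n
  induction n using iroot3Scan.induct x with
  | case1 n h ih =>
    intro hbelow
    rw [iroot3Scan, dif_pos h]
    refine ih ?_
    intro m hm hmlt
    by_cases hc : m < (n : Int)
    · exact hbelow m hm hc
    · have hmn : m = (n : Int) := by push_cast at hmlt ⊢; omega
      simpa [hmn] using h
  | case2 n h =>
    intro hbelow
    rw [iroot3Scan, dif_neg h]
    refine ⟨Int.natCast_nonneg n, by omega, ?_⟩
    intro m hm hx
    by_contra hc
    have := hbelow m hm (by omega)
    omega

theorem iroot3_alt_isRoot (x : Int) : IsRoot x (iroot3_alt x) := by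
  unfold iroot3_alt
  split_ifs with hx
  · exact ⟨le_refl 0, by simpa using hx, fun m hm _ => hm⟩
  · exact iroot3Scan_isRoot x 0 (by intro m hm hmlt; omega)

-- ===== VERDICT (by name: the statement is the Claim_ definition above) =====
theorem iroot3_spec : Claim_equal_iroot3 := by
  intro x _
  exact IsRoot_unique (iroot3_isRoot x) (iroot3_alt_isRoot x)
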